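-- pv_equiv track=rewrite | github.com/ahonnecke/euler | leetcode/10.py | arrayifyExpression
-- ===== SOURCE A (Python) =====
-- def arrayifyExpression(regex):
--     out = []
--     for i in range(len(regex)):
--         result = regex[i]
--         if result == "*" or result == "+":
--             continue
--         if i < len(regex) - 1:
--             if regex[i+1] == "*":
--                 result += "*"
--             if regex[i+1] == "+":
--                 result += "+"
--         out.append(result)
--
--     return out
-- ===== SOURCE B (Python) =====
-- def arrayifyExpression(regex):
--     out = []
--     prev_is_literal = False
--     for c in regex:
--         if c == "*" or c == "+":
--             if prev_is_literal:
--                 out[-1] = out[-1] + c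
--             prev_is_literal = False
--         else:
--             out.append(c)
--             prev_is_literal = True
--     return out
-- ===== Notes on version B (the rewrite author's own statement) =====
-- stated objective: alternative
-- what changed: Replaced the look-ahead index loop (range(len) with peeking at regex[i+1]) with a single reactive forward pass that iterates the characters directly, keeps a prev_is_literal flag and attaches a quantifier to the last emitted token when it is seen.
import Mathlib
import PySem

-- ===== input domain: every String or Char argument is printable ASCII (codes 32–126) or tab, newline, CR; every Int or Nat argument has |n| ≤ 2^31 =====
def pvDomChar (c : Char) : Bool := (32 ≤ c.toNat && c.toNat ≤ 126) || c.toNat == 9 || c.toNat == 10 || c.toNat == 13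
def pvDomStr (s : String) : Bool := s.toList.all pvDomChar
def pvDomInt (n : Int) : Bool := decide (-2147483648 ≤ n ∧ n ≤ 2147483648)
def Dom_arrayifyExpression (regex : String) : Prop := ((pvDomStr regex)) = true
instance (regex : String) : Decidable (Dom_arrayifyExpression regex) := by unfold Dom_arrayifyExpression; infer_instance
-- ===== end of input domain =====

-- B replaces A's look-ahead at regex[i+1] by a reactive one-pass scan with a prev-literal flag; same cost, no peeking (objective: alternative).
-- Tokens are built as List Char and converted by String.mk at the end (strings-as-char-lists, as in PySem).

-- ===== PORT A =====
-- A's loop, step for step: quantifier chars are skipped; otherwise result = regex[i],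
-- extended by '*' or '+' when the look-ahead regex[i+1] is that quantifier, then appended.
def pvGoA : List Char → List (List Char)
  | [] => []
  | [c] => if c = '*' ∨ c = '+' then [] else [[c]]
  | c :: d :: rest =>
    if c = '*' ∨ c = '+' then pvGoA (d :: rest)
    else
      (let r := [c]
       let r := if d = '*' then r ++ ['*'] else r
       let r := if d = '+' then r ++ ['+'] else r
       r) :: pvGoA (d :: rest)

def arrayifyExpression (regex : String) : List String :=
  (pvGoA regex.toList).map String.mk

-- ===== PORT B =====
-- out[-1] = out[-1] + c  (only called with out nonempty)
def pvAttachLast : List (List Char) → Char → List (List Char)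
  | [], _ => []
  | [t], c => [t ++ [c]]
  | t :: u :: rest, c => t :: pvAttachLast (u :: rest) c

def pvGoB : List Char → List (List Char) → Bool → List (List Char)
  | [], out, _ => out
  | c :: rest, out, prevLit =>
    if c = '*' ∨ c = '+' then
      pvGoB rest (if prevLit then pvAttachLast out c else out) false
    else
      pvGoB rest (out ++ [[c]]) true

def arrayifyExpression_alt (regex : String) : List String :=
  (pvGoB regex.toList [] false).map String.mk

-- ===== PRECONDITION & SPEC =====
def Spec_arrayifyExpression (regex : String) (out : List String) : Prop := out = arrayifyExpression_alt regex
instance (regex : String) (out : List String) : Decidable (Spec_arrayifyExpression regex out) := by unfold Spec_arrayifyExpression; infer_instance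

-- ===== CLAIM (what is proved, stated in full; the proofs are below) =====
def Claim_equal_arrayifyExpression : Prop := ∀ (regex : String), Dom_arrayifyExpression regex → Spec_arrayifyExpression regex (arrayifyExpression regex)

-- ===== LEMMAS AND PROOFS =====
theorem pvAttachLast_append (out : List (List Char)) (t : List Char) (c : Char) :
    pvAttachLast (out ++ [t]) c = out ++ [t ++ [c]] := by
  induction out with
  | nil => rfl
  | cons h tail ih =>
    cases tail with
    | nil => rfl
    | cons h2 t2 => simpa [pvAttachLast] using ih

-- the loop invariant: with the flag down B extends out by exactly A's tokens;
-- with the flag up (last token a fresh literal [c]) B extends out by A's tokens for (c :: l).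
theorem pvGoA_quant (d : Char) (rest : List Char) (hd : d = '*' ∨ d = '+') :
    pvGoA (d :: rest) = pvGoA rest := by
  cases rest with
  | nil => simp [pvGoA, hd]
  | cons e r => simp [pvGoA, hd]

-- the loop invariant: with the flag down B extends out by exactly A's tokens;
-- with the flag up (last token a fresh literal [c]) B extends out by A's tokens for (c :: l).
theorem pvGo_inv (l : List Char) :
    (∀ out, pvGoB l out false = out ++ pvGoA l) ∧
    (∀ out c, ¬ (c = '*' ∨ c = '+') →
      pvGoB l (out ++ [[c]]) true = out ++ pvGoA (c :: l)) := by
  induction l with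
  | nil =>
    constructor
    · intro out; simp [pvGoB, pvGoA]
    · intro out c hc; simp [pvGoB, pvGoA, hc]
  | cons d rest ih =>
    obtain ⟨ih1, ih2⟩ := ih
    constructor
    · intro out
      by_cases hd : d = '*' ∨ d = '+'
      · simp [pvGoB, hd, ih1, pvGoA_quant d rest hd]
      · have h2 := ih2 out d hd
        simp only [pvGoB, hd] at h2 ⊢
        simpa using h2
    · intro out c hc
      by_cases hd : d = '*' ∨ d = '+'
      · have hc' : ¬ c = '*' ∧ ¬ c = '+' := by tauto
        rcases hd with h | h <;> subst h <;>
          simp [pvGoB, pvAttachLast_append, ih1, pvGoA, hc'.1, hc'.2] <;>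
          exact (pvGoA_quant _ rest (by simp)).symm
      · have h2 := ih2 (out ++ [[c]]) d hd
        have hd' : ¬ d = '*' ∧ ¬ d = '+' := by tauto
        simp only [pvGoB, hd] at h2 ⊢
        simp only [List.append_assoc] at h2
        rw [show ([[c]] ++ [[d]] : List (List Char)) = [[c], [d]] from rfl] at h2
        simpa [pvGoA, hc, hd'.1, hd'.2] using h2

-- ===== VERDICT (by name: the statement is the Claim_ definition above) =====
theorem arrayifyExpression_spec : Claim_equal_arrayifyExpression := by
  intro regex _
  unfold Spec_arrayifyExpression arrayifyExpression arrayifyExpression_alt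
  rw [(pvGo_inv regex.toList).1 []]
  rfl
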